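-- pv_equiv track=rewrite | github.com/nicoluv/TareaP1 | tarea7/test_array.py | ForTestacmTeam
-- ===== SOURCE A (Python) =====
-- def ForTestacmTeam(topic):
--
--     arr = []
--     for i in range(len(topic)):
--
--         for j in range(i + 1, len(topic)):
--             e = int(topic[i]) + int(topic[j])
--
--             arr.append(len(str(e)) - str(e).count("0"))
--     n_max = max(arr)
--     return [n_max, arr.count(n_max)]
-- ===== SOURCE B (Python) =====
-- def ForTestacmTeam(topic):
--     # Histogram the parsed values, then aggregate nonzero-digit counts of sums
--     # over DISTINCT value pairs, weighted by multiplicities: O(d^2) in the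
--     # number d of distinct values instead of O(n^2) index pairs.
--     vals = [int(t) for t in topic]
--     cnt = {}
--     for v in vals:
--         cnt[v] = cnt.get(v, 0) + 1
--     items = list(cnt.items())
--     freq = {}
--     for a in range(len(items)):
--         v, k = items[a]
--         same = k * (k - 1) // 2
--         if same:
--             s = str(v + v)
--             c = len(s) - s.count("0")
--             freq[c] = freq.get(c, 0) + same
--         for b in range(a + 1, len(items)):
--             w, l = items[b]
--             s = str(v + w)
--             c = len(s) - s.count("0")
--             freq[c] = freq.get(c, 0) + k * l
--     m = max(freq)
--     return [m, freq[m]]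
-- ===== Notes on version B (the rewrite author's own statement) =====
-- stated objective: alternative
-- what changed: B replaces the build-all-pair-counts list plus max()+count() rescans by a value histogram: it tallies each distinct parsed value once, aggregates digit-count contributions over distinct-value pairs weighted by multiplicities (k*l cross pairs, k*(k-1)/2 same-value pairs) into a dict, and takes the max key with its tally; Pre_ excludes exactly the inputs on which A raises ValueError (lists with fewer than two elements, where no pair exists and max() raises, and lists containing a string that int() cannot parse).
import Mathlib
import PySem

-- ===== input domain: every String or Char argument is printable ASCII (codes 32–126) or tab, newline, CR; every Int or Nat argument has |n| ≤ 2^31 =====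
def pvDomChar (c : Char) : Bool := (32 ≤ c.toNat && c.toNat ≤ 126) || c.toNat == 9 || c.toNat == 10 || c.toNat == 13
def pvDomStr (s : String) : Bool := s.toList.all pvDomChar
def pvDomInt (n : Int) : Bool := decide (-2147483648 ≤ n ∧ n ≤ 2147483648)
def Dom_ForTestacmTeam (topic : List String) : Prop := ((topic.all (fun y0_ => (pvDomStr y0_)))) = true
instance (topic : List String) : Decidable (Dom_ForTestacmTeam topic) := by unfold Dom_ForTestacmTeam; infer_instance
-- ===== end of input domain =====

-- B replaces the pair-list + max() + count() rescans by a value histogram that aggregates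
-- digit-count contributions over DISTINCT value pairs weighted by multiplicities;
-- equivalence of the return values proved on Pre_.

-- ===== PORT A =====
-- len(str(e)) - str(e).count("0")  (identical expression in Source A and Source B)
def pvNZ (e : Int) : Int :=
  PySem.Str.len (PySem.Int.toStr e) - (PySem.Str.count (PySem.Int.toStr e) "0" : Int)

def ForTestacmTeam (topic : List String) : List Int :=
  -- arr = []; nested index loops appending; int() ported via ofStr? with .getD 0 (parse
  -- failure = ValueError, excluded by Pre_); max of the empty list raises, excluded by Pre_.
  let arr : List Int :=
    (PySem.List.pyRange 0 (PySem.List.len topic) 1).foldl (fun arr i =>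
      (PySem.List.pyRange (i + 1) (PySem.List.len topic) 1).foldl (fun arr j =>
        let e := (PySem.Int.ofStr? (PySem.List.pyGetD topic i "")).getD 0
               + (PySem.Int.ofStr? (PySem.List.pyGetD topic j "")).getD 0
        arr ++ [pvNZ e]) arr) []
  let n_max := (PySem.List.max? arr (fun y => y)).getD 0
  [n_max, (PySem.List.count arr n_max : Int)]

-- ===== PORT B =====
def ForTestacmTeam_alt (topic : List String) : List Int :=
  let vals := topic.map (fun t => (PySem.Int.ofStr? t).getD 0)
  -- cnt[v] = cnt.get(v, 0) + 1
  let cnt := vals.foldl (fun d v => d.insert v (d.getD v 0 + 1))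
               (PySem.Dict.empty : PySem.Dict Int Int)
  let items := cnt.items
  -- nested index loops over the distinct (value, multiplicity) items, aggregating into freq
  let freq :=
    (PySem.List.pyRange 0 (PySem.List.len items) 1).foldl (fun freq a =>
      let vk := PySem.List.pyGetD items a (0, 0)
      let same := PySem.Int.floordiv (vk.2 * (vk.2 - 1)) 2
      let freq := if same ≠ 0 then
          (let c := pvNZ (vk.1 + vk.1); freq.insert c (freq.getD c 0 + same))
        else freq
      (PySem.List.pyRange (a + 1) (PySem.List.len items) 1).foldl (fun freq b =>
        let wl := PySem.List.pyGetD items b (0, 0)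
        let c := pvNZ (vk.1 + wl.1)
        freq.insert c (freq.getD c 0 + vk.2 * wl.2)) freq)
      (PySem.Dict.empty : PySem.Dict Int Int)
  -- m = max(freq)  (max over the keys; raises on an empty dict, excluded by Pre_);  freq[m]
  let m := (PySem.List.max? freq.keys (fun y => y)).getD 0
  [m, (freq.get? m).getD 0]

-- ===== PRECONDITION & SPEC =====
-- Pre_ excludes exactly the inputs on which Python A raises ValueError: lists with fewer
-- than two elements (no pair exists, so max() raises) and lists containing an unparseable string.
def Pre_ForTestacmTeam (topic : List String) : Prop :=
  2 ≤ topic.length ∧ ∀ t ∈ topic, (PySem.Int.ofStr? t).isSome = true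
instance (topic : List String) : Decidable (Pre_ForTestacmTeam topic) := by
  unfold Pre_ForTestacmTeam; infer_instance

def pvWitness_ForTestacmTeam : List String := ["12", "-3", " 40 ", "-3"]

def Spec_ForTestacmTeam (topic : List String) (out : List Int) : Prop := out = ForTestacmTeam_alt topic
instance (topic : List String) (out : List Int) : Decidable (Spec_ForTestacmTeam topic out) := by unfold Spec_ForTestacmTeam; infer_instance

-- ===== CLAIM (what is proved, stated in full; the proofs are below) =====
def Claim_equal_ForTestacmTeam : Prop := ∀ (topic : List String), Dom_ForTestacmTeam topic → Pre_ForTestacmTeam topic → Spec_ForTestacmTeam topic (ForTestacmTeam topic)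

-- ===== LEMMAS AND PROOFS =====

-- the common loop shape of both ports: a nested index loop 'for a in range(len(l)):
-- for b in range(a+1, len(l))', as structural recursion on l
def pvTri {α σ : Type} (g1 : σ → α → σ) (g2 : σ → α → α → σ) : List α → σ → σ
  | [], s => s
  | x :: t, s => pvTri g1 g2 t (t.foldl (fun s y => g2 s x y) (g1 s x))

-- the list A builds, as structural recursion on the parsed values
def pvPairs : List Int → List Int
  | [] => []
  | x :: t => t.map (fun y => pvNZ (x + y)) ++ pvPairs t

-- a (value, multiplicity) histogram expanded back to a value list
def pvExpand (gs : List (Int × Int)) : List Int :=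
  gs.flatMap (fun p => List.replicate p.2.toNat p.1)

-- number of unordered same-value pairs among n copies
def pvC2 : Nat → Nat
  | 0 => 0
  | n + 1 => n + pvC2 n

-- weighted count of the groups whose cross pair with v lands on digit-count c
def pvCross (v c : Int) (gs : List (Int × Int)) : Int :=
  (gs.map (fun q => if pvNZ (v + q.1) = c then q.2 else 0)).sum

-- B's two step functions (self pairs / cross pairs)
def pvG1 (s : PySem.Dict Int Int) (p : Int × Int) : PySem.Dict Int Int :=
  let same := PySem.Int.floordiv (p.2 * (p.2 - 1)) 2
  if same ≠ 0 then
    (let c := pvNZ (p.1 + p.1); s.insert c (s.getD c 0 + same))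
  else s

def pvG2 (s : PySem.Dict Int Int) (p q : Int × Int) : PySem.Dict Int Int :=
  let c := pvNZ (p.1 + q.1)
  s.insert c (s.getD c 0 + p.2 * q.2)

theorem pvTri_eq {α σ : Type} (g1 : σ → α → σ) (g2 : σ → α → α → σ) (d : α) (l : List α) :
    ∀ (s : σ),
    (PySem.List.pyRange 0 (PySem.List.len l) 1).foldl (fun s a =>
      (PySem.List.pyRange (a + 1) (PySem.List.len l) 1).foldl (fun s b =>
        g2 s (PySem.List.pyGetD l a d) (PySem.List.pyGetD l b d)) (g1 s (PySem.List.pyGetD l a d))) s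
    = pvTri g1 g2 l s := by
  suffices H : ∀ (m k : Nat) (s : σ), l.length ≤ k + m →
      (PySem.List.pyRange (k : Int) (PySem.List.len l) 1).foldl (fun s a =>
        (PySem.List.pyRange (a + 1) (PySem.List.len l) 1).foldl (fun s b =>
          g2 s (PySem.List.pyGetD l a d) (PySem.List.pyGetD l b d)) (g1 s (PySem.List.pyGetD l a d))) s
      = pvTri g1 g2 (l.drop k) s by
    intro s
    have := H l.length 0 s (by omega)
    simpa using this
  intro m
  induction m with
  | zero =>
    intro k s hk
    rw [PySem.List.pyRange_one_eq_nil (by simp [PySem.List.len_eq]; omega)]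
    rw [List.drop_eq_nil_of_le (by omega)]
    rfl
  | succ m ih =>
    intro k s hk
    by_cases hlt : k < l.length
    · rw [PySem.List.pyRange_one_cons (by simp [PySem.List.len_eq]; exact_mod_cast hlt)]
      rw [List.foldl_cons]
      have hget : PySem.List.pyGetD l (k : Int) d = l[k] := by
        rw [PySem.List.pyGetD_eq_getElem l d (by omega) (by exact_mod_cast hlt)]
        simp
      have hdrop : l.drop k = l[k] :: l.drop (k + 1) := by
        exact (List.getElem_cons_drop hlt).symm
      have hcast : ((k : Int) + 1) = ((k + 1 : Nat) : Int) := by push_cast; ring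
      rw [hget]
      -- inner fold = fold over drop (k+1)
      rw [show (PySem.List.pyRange ((k : Int) + 1) (PySem.List.len l) 1).foldl
            (fun s b => g2 s l[k] (PySem.List.pyGetD l b d)) (g1 s l[k])
          = (l.drop (k+1)).foldl (fun s y => g2 s l[k] y) (g1 s l[k]) by
        have := PySem.List.foldl_pyRange_pyGetD l d (fun s y => g2 s l[k] y) (g1 s l[k])
          (a := (k : Int) + 1) (by omega)
        simpa using this]
      rw [hcast, ih (k + 1) _ (by omega), hdrop]
      rfl
    · rw [PySem.List.pyRange_one_eq_nil (by simp [PySem.List.len_eq]; omega)]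
      rw [List.drop_eq_nil_of_le (by omega)]
      rfl

-- A's loops build exactly pvPairs of the parsed values
theorem pvTri_A (l : List String) :
    ∀ (s : List Int),
    pvTri (fun s _ => s)
      (fun s a b => s ++ [pvNZ ((PySem.Int.ofStr? a).getD 0 + (PySem.Int.ofStr? b).getD 0)]) l s
    = s ++ pvPairs (l.map (fun t => (PySem.Int.ofStr? t).getD 0)) := by
  induction l with
  | nil => intro s; simp [pvTri, pvPairs]
  | cons x t ih =>
    intro s
    show pvTri _ _ t (t.foldl _ s) = _
    rw [PySem.List.foldl_append_singleton_eq_map, ih]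
    simp [pvPairs, List.map_map]

theorem pvPairs_perm {l l' : List Int} (h : l.Perm l') : (pvPairs l).Perm (pvPairs l') := by
  induction h with
  | nil => exact List.Perm.refl _
  | cons x h ih => exact List.Perm.append (List.Perm.map _ h) ih
  | swap x y t =>
    show ((x :: t).map (fun z => pvNZ (y + z)) ++ (t.map (fun z => pvNZ (x + z)) ++ pvPairs t)).Perm
      ((y :: t).map (fun z => pvNZ (x + z)) ++ (t.map (fun z => pvNZ (y + z)) ++ pvPairs t))
    simp only [List.map_cons]
    have hxy : pvNZ (y + x) = pvNZ (x + y) := by rw [Int.add_comm]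
    rw [hxy]
    refine List.Perm.cons _ ?_
    show (List.map (fun z => pvNZ (y + z)) t ++ (List.map (fun z => pvNZ (x + z)) t ++ pvPairs t)).Perm
      (List.map (fun z => pvNZ (x + z)) t ++ (List.map (fun z => pvNZ (y + z)) t ++ pvPairs t))
    rw [← List.append_assoc, ← List.append_assoc]
    exact (List.perm_append_comm).append_right _
  | trans h1 h2 ih1 ih2 => exact List.Perm.trans ih1 ih2

theorem pvCount_flatMap_replicate {ds : List Int} (hnd : ds.Nodup) (a : Int)
    (f : Int → Nat) :
    (ds.flatMap (fun k => List.replicate (f k) k)).count a = if a ∈ ds then f a else 0 := by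
  induction ds with
  | nil => simp
  | cons x t ih =>
    rw [List.nodup_cons] at hnd
    rw [List.flatMap_cons, List.count_append, List.count_replicate, ih hnd.2]
    by_cases hx : a = x
    · subst hx; simp [hnd.1]
    · simp [hx, Ne.symm hx]

theorem pvExpand_counter (vals : List Int) :
    vals.Perm (pvExpand (PySem.Dict.counter vals).items) := by
  rw [List.perm_iff_count]
  intro a
  rw [PySem.Dict.items_counter, pvExpand, List.flatMap_map]
  have : (fun k => List.replicate ((k, (vals.count k : Int)).2.toNat) (k, (vals.count k : Int)).1)
       = fun k => List.replicate (vals.count k) k := by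
    funext k; simp
  rw [show (List.flatMap (fun k => List.replicate ((k, (vals.count k : Int)).2.toNat) (k, (vals.count k : Int)).1) (PySem.Set.ofList vals)) = List.flatMap (fun k => List.replicate (vals.count k) k) (PySem.Set.ofList vals) from by rw [this]]
  rw [pvCount_flatMap_replicate (PySem.Set.nodup_ofList vals) a (fun k => vals.count k)]
  by_cases ha : a ∈ vals
  · simp [PySem.Set.mem_ofList, ha]
  · simp [PySem.Set.mem_ofList, ha, List.count_eq_zero.mpr ha]

theorem pvCount_map (c : Int) (f : Int → Int) (l : List Int) :
    (l.map f).count c = l.countP (fun a => f a == c) := by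
  rw [List.count, List.countP_map]
  rfl

theorem pvPairs_count_append (c : Int) (as bs : List Int) :
    (pvPairs (as ++ bs)).count c
      = (pvPairs as).count c
        + (as.map (fun x => bs.countP (fun y => pvNZ (x + y) == c))).sum
        + (pvPairs bs).count c := by
  induction as with
  | nil => simp [pvPairs]
  | cons x as ih =>
    show ((as ++ bs).map (fun y => pvNZ (x + y)) ++ pvPairs (as ++ bs)).count c = _
    rw [List.count_append, pvCount_map, List.countP_append, ih]
    show _ = ((as.map (fun y => pvNZ (x + y)) ++ pvPairs as).count c) + _ + _
    rw [List.count_append, pvCount_map, List.map_cons, List.sum_cons]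
    omega

theorem pvPairs_replicate (n : Nat) (v : Int) :
    pvPairs (List.replicate n v) = List.replicate (pvC2 n) (pvNZ (v + v)) := by
  induction n with
  | zero => rfl
  | succ n ih =>
    rw [List.replicate_succ]
    show (List.replicate n v).map (fun y => pvNZ (v + y)) ++ pvPairs (List.replicate n v) = _
    rw [List.map_replicate, ih, ← List.replicate_add]
    rfl

theorem pvC2_double (n : Nat) : 2 * pvC2 n = n * (n - 1) := by
  induction n with
  | zero => rfl
  | succ n ih =>
    show 2 * (n + pvC2 n) = (n + 1) * n
    cases n with
    | zero => rfl
    | succ m =>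
      rw [Nat.mul_add, ih]
      simp
      ring

theorem pvC2_cast (n : Nat) :
    (pvC2 n : Int) = PySem.Int.floordiv ((n : Int) * ((n : Int) - 1)) 2 := by
  cases n with
  | zero => decide
  | succ m =>
    have h1 : ((m + 1 : Nat) : Int) * (((m + 1 : Nat) : Int) - 1) = (((m + 1) * m : Nat) : Int) := by
      push_cast; ring
    rw [h1]
    rw [show ((((m+1)*m : Nat)) : Int) = (((m+1)*((m+1)-1) : Nat) : Int) by simp]
    rw [show (2:Int) = ((2:Nat):Int) from rfl, PySem.Int.floordiv_natCast]
    have := pvC2_double (m + 1)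
    congr 1
    omega

theorem pvCountP_expand (v c : Int) (gs : List (Int × Int)) (hw : ∀ p ∈ gs, 1 ≤ p.2) :
    ((pvExpand gs).countP (fun y => pvNZ (v + y) == c) : Int) = pvCross v c gs := by
  induction gs with
  | nil => simp [pvExpand, pvCross]
  | cons q rest ih =>
    rw [show pvExpand (q::rest) = List.replicate q.2.toNat q.1 ++ pvExpand rest from rfl]
    rw [List.countP_append, List.countP_replicate]
    have hq : (1 : Int) ≤ q.2 := hw q (by simp)
    have hrest : ∀ p ∈ rest, (1:Int) ≤ p.2 := fun p hp => hw p (by simp [hp])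
    rw [pvCross, List.map_cons, List.sum_cons]
    push_cast
    rw [show ((pvExpand rest).countP (fun y => pvNZ (v + y) == c) : Int) = pvCross v c rest from ih hrest]
    by_cases h : pvNZ (v + q.1) = c
    · simp [h, Int.toNat_of_nonneg (by omega : (0:Int) ≤ q.2)]; rfl
    · simp [h]; rfl

theorem pvCross_cons (v c : Int) (q : Int × Int) (rest : List (Int × Int)) :
    pvCross v c (q :: rest) = (if pvNZ (v + q.1) = c then q.2 else 0) + pvCross v c rest := by
  simp [pvCross]

theorem pvInner_getD (p : Int × Int) (rest : List (Int × Int)) :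
    ∀ (s : PySem.Dict Int Int) (c : Int),
    (rest.foldl (fun s q => pvG2 s p q) s).getD c 0
      = s.getD c 0 + p.2 * pvCross p.1 c rest := by
  induction rest with
  | nil => intro s c; simp [pvCross]
  | cons q rest ih =>
    intro s c
    rw [List.foldl_cons, ih]
    show (PySem.Dict.insert s (pvNZ (p.1 + q.1)) _).getD c 0 + _ = _
    rw [PySem.Dict.getD_insert, pvCross_cons]
    by_cases h : c = pvNZ (p.1 + q.1)
    · rw [if_pos h, if_pos h.symm, ← h]; ring
    · rw [if_neg h, if_neg (fun hh => h hh.symm)]; ring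

theorem pvG1_getD (s : PySem.Dict Int Int) (p : Int × Int) (c : Int) (hp : 1 ≤ p.2) :
    (pvG1 s p).getD c 0
      = s.getD c 0 + (if c = pvNZ (p.1 + p.1) then (pvC2 p.2.toNat : Int) else 0) := by
  have hcast : ((p.2.toNat : Nat) : Int) = p.2 := Int.toNat_of_nonneg (by omega)
  have hsame : PySem.Int.floordiv (p.2 * (p.2 - 1)) 2 = (pvC2 p.2.toNat : Int) := by
    rw [pvC2_cast, hcast]
  unfold pvG1
  by_cases h0 : PySem.Int.floordiv (p.2 * (p.2 - 1)) 2 ≠ 0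
  · rw [if_pos h0]
    show (PySem.Dict.insert s (pvNZ (p.1 + p.1)) _).getD c 0 = _
    rw [PySem.Dict.getD_insert]
    by_cases h : c = pvNZ (p.1 + p.1)
    · rw [if_pos h, if_pos h, hsame, h]
    · rw [if_neg h, if_neg h]; ring
  · rw [if_neg h0]
    rw [not_ne_iff] at h0
    rw [hsame] at h0
    rw [← h0]
    by_cases h : c = pvNZ (p.1 + p.1) <;> simp [h, ← h0]

theorem pvTri_B_getD (gs : List (Int × Int)) :
    ∀ (s : PySem.Dict Int Int) (c : Int), (∀ p ∈ gs, 1 ≤ p.2) →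
    (pvTri pvG1 pvG2 gs s).getD c 0 = s.getD c 0 + ((pvPairs (pvExpand gs)).count c : Int) := by
  induction gs with
  | nil => intro s c _; simp [pvTri, pvPairs, pvExpand]
  | cons p rest ih =>
    intro s c hw
    have hp : 1 ≤ p.2 := hw p (by simp)
    have hrest : ∀ q ∈ rest, (1:Int) ≤ q.2 := fun q hq => hw q (by simp [hq])
    show (pvTri pvG1 pvG2 rest _).getD c 0 = _
    rw [ih _ c hrest, pvInner_getD, pvG1_getD _ _ _ hp]
    rw [show pvExpand (p :: rest) = List.replicate p.2.toNat p.1 ++ pvExpand rest from rfl]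
    rw [pvPairs_count_append, pvPairs_replicate, List.count_replicate]
    rw [List.map_replicate, List.sum_replicate, smul_eq_mul]
    have hcast : ((p.2.toNat : Nat) : Int) = p.2 := Int.toNat_of_nonneg (by omega)
    push_cast
    rw [pvCountP_expand p.1 c rest hrest, hcast]
    by_cases h : pvNZ (p.1 + p.1) = c
    · rw [if_pos h.symm, if_pos (by simp [h])]; ring
    · rw [if_neg (fun hh => h hh.symm), if_neg (by simp [h])]; ring

def pvGood (s : PySem.Dict Int Int) : Prop :=
  ∀ c : Int, (c ∈ s.keys ↔ s.getD c 0 ≠ 0) ∧ 0 ≤ s.getD c 0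

theorem pvGood_insert (s : PySem.Dict Int Int) (c0 amt : Int) (hg : pvGood s) (ha : 0 < amt) :
    pvGood (s.insert c0 (s.getD c0 0 + amt)) := by
  intro c
  rw [PySem.Dict.getD_insert]
  constructor
  · rw [PySem.Dict.mem_keys_insert]
    by_cases h : c = c0
    · subst h
      have := (hg c).2
      simp
      omega
    · rw [if_neg h]
      simp [h, (hg c).1]
  · by_cases h : c = c0
    · rw [if_pos h]; have := (hg c0).2; omega
    · rw [if_neg h]; exact (hg c).2

theorem pvGood_inner (p : Int × Int) (hp : 1 ≤ p.2) (rest : List (Int × Int))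
    (hr : ∀ q ∈ rest, 1 ≤ q.2) :
    ∀ (s : PySem.Dict Int Int), pvGood s → pvGood (rest.foldl (fun s q => pvG2 s p q) s) := by
  induction rest with
  | nil => intro s hs; exact hs
  | cons q rest ih =>
    intro s hs
    have hq : (1:Int) ≤ q.2 := hr q (by simp)
    refine ih (fun q hq' => hr q (by simp [hq'])) _ ?_
    exact pvGood_insert _ _ _ hs (by positivity)

theorem pvGood_tri (gs : List (Int × Int)) :
    ∀ (s : PySem.Dict Int Int), (∀ p ∈ gs, 1 ≤ p.2) → pvGood s → pvGood (pvTri pvG1 pvG2 gs s) := by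
  induction gs with
  | nil => intro s _ hs; exact hs
  | cons p rest ih =>
    intro s hw hs
    have hp : 1 ≤ p.2 := hw p (by simp)
    refine ih _ (fun q hq => hw q (by simp [hq])) ?_
    refine pvGood_inner p hp rest (fun q hq => hw q (by simp [hq])) _ ?_
    unfold pvG1
    by_cases h0 : PySem.Int.floordiv (p.2 * (p.2 - 1)) 2 ≠ 0
    · rw [if_pos h0]
      refine pvGood_insert _ _ _ hs ?_
      have hcast : ((p.2.toNat : Nat) : Int) = p.2 := Int.toNat_of_nonneg (by omega)
      have hsame : PySem.Int.floordiv (p.2 * (p.2 - 1)) 2 = (pvC2 p.2.toNat : Int) := by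
        rw [pvC2_cast, hcast]
      rw [hsame] at h0 ⊢
      have : (0:Int) ≤ (pvC2 p.2.toNat : Int) := by positivity
      omega
    · rw [if_neg h0]; exact hs

theorem pvMax_congr (l1 l2 : List Int) (h : ∀ c, c ∈ l1 ↔ c ∈ l2) :
    PySem.List.max? l1 (fun y => y) = PySem.List.max? l2 (fun y => y) := by
  cases h1 : PySem.List.max? l1 (fun y => y) with
  | none =>
    rw [PySem.List.max?_eq_none_iff] at h1
    subst h1
    cases h2 : PySem.List.max? l2 (fun y => y) with
    | none => rfl
    | some m2 =>
      have := PySem.List.max?_mem h2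
      rw [← h] at this
      simp at this
  | some m1 =>
    cases h2 : PySem.List.max? l2 (fun y => y) with
    | none =>
      rw [PySem.List.max?_eq_none_iff] at h2
      subst h2
      have := PySem.List.max?_mem h1
      rw [h] at this
      simp at this
    | some m2 =>
      have hm1 : m1 ∈ l2 := (h m1).1 (PySem.List.max?_mem h1)
      have hm2 : m2 ∈ l1 := (h m2).2 (PySem.List.max?_mem h2)
      have h12 : m1 ≤ m2 := PySem.List.max?_isMax h2 m1 hm1
      have h21 : m2 ≤ m1 := PySem.List.max?_isMax h1 m2 hm2
      rw [le_antisymm h12 h21]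

-- ===== VERDICT (by name: the statement is the Claim_ definition above) =====
set_option maxHeartbeats 1000000 in
theorem ForTestacmTeam_spec : Claim_equal_ForTestacmTeam := by
  unfold Claim_equal_ForTestacmTeam
  intro topic _hdom _hpre
  unfold Spec_ForTestacmTeam ForTestacmTeam ForTestacmTeam_alt
  simp only []
  set vals := topic.map (fun t => (PySem.Int.ofStr? t).getD 0) with hvals
  -- A's built list is pvPairs vals
  have hA : (PySem.List.pyRange 0 (PySem.List.len topic) 1).foldl (fun arr i =>
      (PySem.List.pyRange (i + 1) (PySem.List.len topic) 1).foldl (fun arr j =>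
        arr ++ [pvNZ ((PySem.Int.ofStr? (PySem.List.pyGetD topic i "")).getD 0
                    + (PySem.Int.ofStr? (PySem.List.pyGetD topic j "")).getD 0)]) arr) []
      = pvPairs vals := by
    have h1 := pvTri_eq (σ := List Int) (fun s _ => s)
      (fun s a b => s ++ [pvNZ ((PySem.Int.ofStr? a).getD 0 + (PySem.Int.ofStr? b).getD 0)])
      "" topic []
    rw [pvTri_A] at h1
    simpa using h1
  -- B's counter
  rw [PySem.Dict.foldl_insert_getD_add_one_eq_counter]
  set items := (PySem.Dict.counter vals).items with hitems
  -- B's aggregation loop is pvTri pvG1 pvG2 over the items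
  have hB : (PySem.List.pyRange 0 (PySem.List.len items) 1).foldl (fun freq a =>
      (PySem.List.pyRange (a + 1) (PySem.List.len items) 1).foldl (fun freq b =>
        freq.insert (pvNZ ((PySem.List.pyGetD items a (0, 0)).1 + (PySem.List.pyGetD items b (0, 0)).1))
          (freq.getD (pvNZ ((PySem.List.pyGetD items a (0, 0)).1 + (PySem.List.pyGetD items b (0, 0)).1)) 0
            + (PySem.List.pyGetD items a (0, 0)).2 * (PySem.List.pyGetD items b (0, 0)).2))
        (if PySem.Int.floordiv ((PySem.List.pyGetD items a (0, 0)).2 * ((PySem.List.pyGetD items a (0, 0)).2 - 1)) 2 ≠ 0 then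
          (PySem.Dict.insert freq (pvNZ ((PySem.List.pyGetD items a (0, 0)).1 + (PySem.List.pyGetD items a (0, 0)).1))
            (freq.getD (pvNZ ((PySem.List.pyGetD items a (0, 0)).1 + (PySem.List.pyGetD items a (0, 0)).1)) 0
              + PySem.Int.floordiv ((PySem.List.pyGetD items a (0, 0)).2 * ((PySem.List.pyGetD items a (0, 0)).2 - 1)) 2))
        else freq)) (PySem.Dict.empty : PySem.Dict Int Int)
      = pvTri pvG1 pvG2 items PySem.Dict.empty := by
    have h2 := pvTri_eq (σ := PySem.Dict Int Int) pvG1 pvG2 (0, 0) items PySem.Dict.empty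
    simp only [pvG1, pvG2] at h2
    simpa using h2
  rw [hA, hB]
  set freq := pvTri pvG1 pvG2 items PySem.Dict.empty with hfreq
  -- every multiplicity in the counter's items is at least 1
  have hw : ∀ p ∈ items, (1 : Int) ≤ p.2 := by
    intro p hp
    rw [hitems, PySem.Dict.items_counter] at hp
    obtain ⟨k, hk, rfl⟩ := List.mem_map.mp hp
    have : k ∈ vals := (PySem.Set.mem_ofList (xs := vals) (y := k)).mp hk
    have h1 := List.count_pos_iff.mpr this
    show (1 : Int) ≤ ((vals.count k : Nat) : Int)
    exact_mod_cast h1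
  -- freq tallies are the pair counts of A's list
  have hgetD : ∀ c : Int, freq.getD c 0 = ((pvPairs vals).count c : Int) := by
    intro c
    rw [hfreq, pvTri_B_getD items PySem.Dict.empty c hw]
    have hperm : (pvPairs vals).Perm (pvPairs (pvExpand items)) :=
      pvPairs_perm (pvExpand_counter vals)
    rw [hperm.count_eq]
    simp
  have hgood : pvGood freq := by
    refine pvGood_tri items PySem.Dict.empty hw ?_
    intro c
    refine ⟨?_, ?_⟩
    · rw [show (PySem.Dict.empty : PySem.Dict Int Int).getD c 0 = 0 from rfl]
      simp [PySem.Dict.keys, PySem.Dict.empty]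
    · rw [show (PySem.Dict.empty : PySem.Dict Int Int).getD c 0 = 0 from rfl]
  -- the key set of freq is exactly the element set of A's list
  have hmem : ∀ c : Int, c ∈ freq.keys ↔ c ∈ pvPairs vals := by
    intro c
    rw [(hgood c).1, hgetD c]
    constructor
    · intro h
      have : (pvPairs vals).count c ≠ 0 := by exact_mod_cast h
      exact List.count_pos_iff.mp (Nat.pos_of_ne_zero this)
    · intro h
      have : (pvPairs vals).count c ≠ 0 := Nat.pos_iff_ne_zero.mp (List.count_pos_iff.mpr h)
      exact_mod_cast this
  have hmax : PySem.List.max? freq.keys (fun y => y) = PySem.List.max? (pvPairs vals) (fun y => y) :=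
    pvMax_congr _ _ hmem
  rw [hmax]
  congr 1
  rw [← PySem.Dict.getD_eq_get?_getD, hgetD]
  simp [PySem.List.count]
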